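-- pv_equiv track=rewrite | github.com/EvanSun96/codesignal | robinhoodprep.py | countSawSubarrays
-- ===== SOURCE A (Python) =====
-- def countSawSubarrays(array):
--     if not array or len(array) < 2:
--         return 0
--     n = len(array)
--     large_th_pre = [0]*n
--     small_th_pre = [0]*n
--
--     res = 0
--     for i in range(1, len(array)):
--         num = array[i]
--         if num == array[i-1]:
--             continue
--         elif num > array[i-1]:
--             subcnt = 1
--             if i -2 >= 0 and small_th_pre[i-1] > 0:
--                 subcnt += 1
--                 subcnt += large_th_pre[i-2]
--             large_th_pre[i] = subcnt
--             res += large_th_pre[i]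
--         else:
--             subcnt = 1
--             if i-2 >= 0 and large_th_pre[i-1] > 0:
--                 subcnt += 1
--                 subcnt += small_th_pre[i-2]
--             small_th_pre[i] = subcnt
--             res += small_th_pre[i]
--     return res
-- ===== SOURCE B (Python) =====
-- def countSawSubarrays(array):
--     res = 0
--     curLen = 1
--     prevSign = 0
--     for prev, cur in zip(array, array[1:]):
--         d = cur - prev
--         s = (d > 0) - (d < 0)
--         if s == 0:
--             curLen = 1
--         elif s == -prevSign:
--             curLen += 1
--         else:
--             curLen = 2
--         prevSign = s
--         res += curLen - 1
--     return res
-- ===== Notes on version B (the rewrite author's own statement) =====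
-- stated objective: simpler
-- what changed: Replaces A's two length-n DP prefix arrays (rise/fall counts with index bookkeeping) by a single pass over consecutive pairs keeping just two scalars: the current alternating-run length and the previous step's sign, adding runLength-1 per step.
import Mathlib
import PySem

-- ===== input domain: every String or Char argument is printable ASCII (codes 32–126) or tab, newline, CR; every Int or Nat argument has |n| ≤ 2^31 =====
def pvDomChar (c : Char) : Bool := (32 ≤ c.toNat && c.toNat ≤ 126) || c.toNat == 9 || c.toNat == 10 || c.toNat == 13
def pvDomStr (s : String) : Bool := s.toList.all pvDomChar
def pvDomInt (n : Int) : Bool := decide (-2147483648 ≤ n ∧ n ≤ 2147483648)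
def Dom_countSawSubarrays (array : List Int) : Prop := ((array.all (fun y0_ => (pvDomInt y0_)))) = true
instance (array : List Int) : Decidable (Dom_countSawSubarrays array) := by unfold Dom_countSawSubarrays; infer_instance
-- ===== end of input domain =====

-- B replaces A's two DP prefix arrays with a single pass over consecutive pairs keeping two scalars (run length, last sign): simpler, O(1) extra space.


-- ===== PORT A =====
-- loop body of A's 'for i in range(1, len(array))'; state = (large_th_pre, small_th_pre, res)
def pvStepA (array : List Int) (st : List Int × List Int × Int) (i : Int) :
    List Int × List Int × Int :=
  let num := PySem.List.pyGetD array i 0          -- a[i]: always in range in the loop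
  if num = PySem.List.pyGetD array (i - 1) 0 then st
  else if num > PySem.List.pyGetD array (i - 1) 0 then
    let subcnt : Int :=
      if 0 ≤ i - 2 ∧ 0 < PySem.List.pyGetD st.2.1 (i - 1) 0 then
        1 + 1 + PySem.List.pyGetD st.1 (i - 2) 0
      else 1
    (PySem.List.pySetD st.1 i subcnt, st.2.1, st.2.2 + subcnt)
  else
    let subcnt : Int :=
      if 0 ≤ i - 2 ∧ 0 < PySem.List.pyGetD st.1 (i - 1) 0 then
        1 + 1 + PySem.List.pyGetD st.2.1 (i - 2) 0
      else 1
    (st.1, PySem.List.pySetD st.2.1 i subcnt, st.2.2 + subcnt)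

def countSawSubarrays (array : List Int) : Int :=
  if array = [] ∨ PySem.List.len array < 2 then 0
  else
    ((PySem.List.pyRange 1 (PySem.List.len array) 1).foldl (pvStepA array)
      (List.replicate array.length (0 : Int), List.replicate array.length (0 : Int), (0 : Int))).2.2

-- ===== PORT B =====
-- loop body of B's 'for prev, cur in zip(array, array[1:])'; state = (res, curLen, prevSign)
def pvStepB (st : Int × Int × Int) (pq : Int × Int) : Int × Int × Int :=
  let d := pq.2 - pq.1
  let s : Int := (if 0 < d then 1 else 0) - (if d < 0 then 1 else 0)
  let curLen' : Int := if s = 0 then 1 else if s = -st.2.2 then st.2.1 + 1 else 2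
  (st.1 + (curLen' - 1), curLen', s)

def countSawSubarrays_alt (array : List Int) : Int :=
  ((array.zip (PySem.List.slice array (some 1) none)).foldl pvStepB (0, 1, 0)).1

-- ===== PRECONDITION & SPEC =====
def Spec_countSawSubarrays (array : List Int) (out : Int) : Prop := out = countSawSubarrays_alt array
instance (array : List Int) (out : Int) : Decidable (Spec_countSawSubarrays array out) := by unfold Spec_countSawSubarrays; infer_instance

-- ===== CLAIM (what is proved, stated in full; the proofs are below) =====
def Claim_equal_countSawSubarrays : Prop := ∀ (array : List Int), Dom_countSawSubarrays array → Spec_countSawSubarrays array (countSawSubarrays array)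

-- ===== LEMMAS AND PROOFS =====

-- getD after set, as one conditional (glue specific to the two DP arrays)
theorem pvGetD_set (xs : List Int) (k j : Nat) (v d : Int) :
    (xs.set k v).getD j d = if j = k ∧ k < xs.length then v else xs.getD j d := by
  simp [List.getD, List.getElem?_set]
  split_ifs <;> simp_all

-- A's state after processing indices 1..m
def pvA (array : List Int) (m : Nat) : List Int × List Int × Int :=
  (PySem.List.pyRange 1 ((m : Int) + 1) 1).foldl (pvStepA array)
    (List.replicate array.length (0 : Int), List.replicate array.length (0 : Int), (0 : Int))

-- B's state after processing the first m pairs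
def pvB (array : List Int) (m : Nat) : Int × Int × Int :=
  ((array.zip array.tail).take m).foldl pvStepB (0, 1, 0)

-- joint invariant between A's array state and B's scalar state after m steps
def pvInv (n m : Nat) (sa : List Int × List Int × Int) (sb : Int × Int × Int) : Prop :=
  sa.2.2 = sb.1 ∧ sa.1.length = n ∧ sa.2.1.length = n ∧
  (∀ j : Nat, m < j → sa.1.getD j 0 = 0 ∧ sa.2.1.getD j 0 = 0) ∧
  ((sb.2.2 = 0 ∧ sb.2.1 = 1 ∧ sa.1.getD m 0 = 0 ∧ sa.2.1.getD m 0 = 0) ∨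
   (sb.2.2 = 1 ∧ 2 ≤ sb.2.1 ∧ 1 ≤ m ∧
      sa.1.getD m 0 = sb.2.1 - 1 ∧ sa.2.1.getD m 0 = 0 ∧
      sa.2.1.getD (m - 1) 0 = (if 3 ≤ sb.2.1 then sb.2.1 - 2 else 0)) ∨
   (sb.2.2 = -1 ∧ 2 ≤ sb.2.1 ∧ 1 ≤ m ∧
      sa.2.1.getD m 0 = sb.2.1 - 1 ∧ sa.1.getD m 0 = 0 ∧
      sa.1.getD (m - 1) 0 = (if 3 ≤ sb.2.1 then sb.2.1 - 2 else 0)))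

theorem pvA_succ (array : List Int) (m : Nat) :
    pvA array (m + 1) = pvStepA array (pvA array m) ((m : Int) + 1) := by
  unfold pvA
  have h : ((m + 1 : Nat) : Int) + 1 = ((m : Int) + 1) + 1 := by push_cast; ring
  rw [h, PySem.List.pyRange_one_succ_right (by omega), List.foldl_append]
  rfl

theorem pvB_succ (array : List Int) (m : Nat) (hm : m + 2 ≤ array.length) :
    pvB array (m + 1) = pvStepB (pvB array m)
      (array.getD m 0, array.getD (m + 1) 0) := by
  unfold pvB
  have h1 : m < array.length := by omega
  have h2 : m < array.tail.length := by simp [List.length_tail]; omega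
  have hz : (array.zip array.tail)[m]? = some (array[m], array.tail[m]) := by
    simp only [List.getElem?_zip_eq_some, getElem?_eq_some_getElem_iff, and_self]
  rw [List.take_add_one, hz]
  simp [List.foldl_append, List.getD, List.getElem?_eq_getElem h1,
    List.getElem?_eq_getElem (by omega : m + 1 < array.length), List.getElem_tail]

-- B's step, written out by cases
theorem pvStepB_eq (rb c p a b : Int) :
    pvStepB (rb, c, p) (a, b) =
      if b = a then (rb, 1, 0)
      else if a < b then (if p = -1 then (rb + c, c + 1, 1) else (rb + 1, 2, 1))
      else (if p = 1 then (rb + c, c + 1, -1) else (rb + 1, 2, -1)) := by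
  unfold pvStepB
  split_ifs <;> simp_all <;> omega

-- A's step at index m+1, written out by cases with Nat indices
theorem pvStepA_eq (array L S : List Int) (r : Int) (m : Nat) :
    pvStepA array (L, S, r) ((m : Int) + 1) =
      if array.getD (m + 1) 0 = array.getD m 0 then (L, S, r)
      else if array.getD m 0 < array.getD (m + 1) 0 then
        ((L.set (m + 1) (if 1 ≤ m ∧ 0 < S.getD m 0 then 2 + L.getD (m - 1) 0 else 1)), S,
          r + (if 1 ≤ m ∧ 0 < S.getD m 0 then 2 + L.getD (m - 1) 0 else 1))
      else
        (L, (S.set (m + 1) (if 1 ≤ m ∧ 0 < L.getD m 0 then 2 + S.getD (m - 1) 0 else 1)),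
          r + (if 1 ≤ m ∧ 0 < L.getD m 0 then 2 + S.getD (m - 1) 0 else 1)) := by
  have e1 : PySem.List.pyGetD array ((m : Int) + 1) 0 = array.getD (m + 1) 0 := by
    have h : ((m : Int) + 1) = ((m + 1 : Nat) : Int) := by push_cast; ring
    rw [h, PySem.List.pyGetD_natCast]
  have e2 : ((m : Int) + 1 - 1) = ((m : Nat) : Int) := by ring
  have e3 : ((m : Int) + 1 - 2) = (m : Int) - 1 := by ring
  have eset : ∀ (xs : List Int) (v : Int),
      PySem.List.pySetD xs ((m : Int) + 1) v = xs.set (m + 1) v := by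
    intro xs v
    have h : ((m : Int) + 1) = ((m + 1 : Nat) : Int) := by push_cast; ring
    rw [h, PySem.List.pySetD_natCast]
  have ec : ∀ x : Int, (0 ≤ (m : Int) - 1 ∧ 0 < x) ↔ (1 ≤ m ∧ 0 < x) := by
    intro x; constructor <;> (rintro ⟨h1, h2⟩; exact ⟨by omega, h2⟩)
  have em1 : ∀ xs : List Int, 1 ≤ m → PySem.List.pyGetD xs ((m : Int) - 1) 0 = xs.getD (m - 1) 0 := by
    intro xs h1
    have h : ((m : Int) - 1) = ((m - 1 : Nat) : Int) := by omega
    rw [h, PySem.List.pyGetD_natCast]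
  unfold pvStepA
  simp only [e1, e2, e3, PySem.List.pyGetD_natCast, eset, ec]
  split_ifs with h1 h2 h3 h4
  · rfl
  · rw [em1 L h3.1]; ring_nf
  · ring_nf
  · rw [em1 S h4.1]; ring_nf
  · rfl

theorem pvMain (array : List Int) (m : Nat) (hm : m + 1 ≤ array.length) :
    pvInv array.length m (pvA array m) (pvB array m) := by
  induction m with
  | zero =>
    unfold pvA pvB pvInv
    rw [PySem.List.pyRange_one_eq_nil (by omega)]
    simp
  | succ m ih =>
    have IH := ih (by omega)
    rw [pvA_succ, pvB_succ array m hm]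
    rcases hA : pvA array m with ⟨L, S, r⟩
    rcases hB : pvB array m with ⟨rb, c, p⟩
    rw [hA, hB] at IH
    obtain ⟨hres, hLlen, hSlen, hzero, hcase⟩ := IH
    simp only at hres hLlen hSlen hzero hcase
    rw [pvStepA_eq, pvStepB_eq]
    have hmn : m + 1 < array.length := by omega
    rcases lt_trichotomy (array.getD m 0) (array.getD (m + 1) 0) with hab | hab | hab
    · -- rising step
      have hne : ¬ (array.getD (m + 1) 0 = array.getD m 0) := by omega
      simp only [if_neg hne, if_pos hab]
      rcases hcase with ⟨hp, hc, hLm, hSm⟩ | ⟨hp, hc, hm1, hLm, hSm, hS1⟩ | ⟨hp, hc, hm1, hSm, hLm, hS1⟩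
      · -- fresh run after a flat/initial position
        rw [if_neg (by omega : ¬(1 ≤ m ∧ 0 < S.getD m 0)), if_neg (by omega : ¬(p = -1))]
        unfold pvInv
        dsimp only
        refine ⟨by omega, by simpa using hLlen, hSlen, ?_,
          Or.inr (Or.inl ⟨rfl, by omega, by omega, ?_, ?_, ?_⟩)⟩
        · intro j hj
          rw [pvGetD_set, if_neg (by omega)]
          exact hzero j (by omega)
        · rw [pvGetD_set, if_pos ⟨rfl, by omega⟩]; norm_num
        · exact (hzero (m + 1) (by omega)).2
        · simp only [Nat.add_sub_cancel]
          rw [if_neg (by norm_num)]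
          exact hSm
      · -- fresh run after a rising step
        rw [if_neg (by omega : ¬(1 ≤ m ∧ 0 < S.getD m 0)), if_neg (by omega : ¬(p = -1))]
        unfold pvInv
        dsimp only
        refine ⟨by omega, by simpa using hLlen, hSlen, ?_,
          Or.inr (Or.inl ⟨rfl, by omega, by omega, ?_, ?_, ?_⟩)⟩
        · intro j hj
          rw [pvGetD_set, if_neg (by omega)]
          exact hzero j (by omega)
        · rw [pvGetD_set, if_pos ⟨rfl, by omega⟩]; norm_num
        · exact (hzero (m + 1) (by omega)).2
        · simp only [Nat.add_sub_cancel]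
          rw [if_neg (by norm_num)]
          exact hSm
      · -- extending a falling run upward
        have hsub : 2 + L.getD (m - 1) 0 = c := by rw [hS1]; split_ifs <;> omega
        rw [if_pos ⟨hm1, by omega⟩, if_pos hp]
        unfold pvInv
        dsimp only
        refine ⟨by omega, by simpa using hLlen, hSlen, ?_,
          Or.inr (Or.inl ⟨rfl, by omega, by omega, ?_, ?_, ?_⟩)⟩
        · intro j hj
          rw [pvGetD_set, if_neg (by omega)]
          exact hzero j (by omega)
        · rw [pvGetD_set, if_pos ⟨rfl, by omega⟩]; omega
        · exact (hzero (m + 1) (by omega)).2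
        · simp only [Nat.add_sub_cancel]
          rw [if_pos (by omega : (3:Int) ≤ c + 1)]
          omega
    · -- equal step
      rw [if_pos hab.symm, if_pos hab.symm]
      refine ⟨hres, hLlen, hSlen, fun j hj => hzero j (by omega), Or.inl ?_⟩
      exact ⟨rfl, rfl, (hzero (m + 1) (by omega)).1, (hzero (m + 1) (by omega)).2⟩
    · -- falling step
      have hne : ¬ (array.getD (m + 1) 0 = array.getD m 0) := by omega
      have hnlt : ¬ (array.getD m 0 < array.getD (m + 1) 0) := by omega
      simp only [if_neg hne, if_neg hnlt]
      rcases hcase with ⟨hp, hc, hLm, hSm⟩ | ⟨hp, hc, hm1, hLm, hSm, hS1⟩ | ⟨hp, hc, hm1, hSm, hLm, hS1⟩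
      · -- fresh run after a flat/initial position
        rw [if_neg (by omega : ¬(1 ≤ m ∧ 0 < L.getD m 0)), if_neg (by omega : ¬(p = 1))]
        unfold pvInv
        dsimp only
        refine ⟨by omega, hLlen, by simpa using hSlen, ?_,
          Or.inr (Or.inr ⟨rfl, by omega, by omega, ?_, ?_, ?_⟩)⟩
        · intro j hj
          refine ⟨(hzero j (by omega)).1, ?_⟩
          rw [pvGetD_set, if_neg (by omega)]
          exact (hzero j (by omega)).2
        · rw [pvGetD_set, if_pos ⟨rfl, by omega⟩]; norm_num
        · exact (hzero (m + 1) (by omega)).1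
        · simp only [Nat.add_sub_cancel]
          rw [if_neg (by norm_num)]
          exact hLm
      · -- extending a rising run downward
        have hsub : 2 + S.getD (m - 1) 0 = c := by rw [hS1]; split_ifs <;> omega
        rw [if_pos ⟨hm1, by omega⟩, if_pos hp]
        unfold pvInv
        dsimp only
        refine ⟨by omega, hLlen, by simpa using hSlen, ?_,
          Or.inr (Or.inr ⟨rfl, by omega, by omega, ?_, ?_, ?_⟩)⟩
        · intro j hj
          refine ⟨(hzero j (by omega)).1, ?_⟩
          rw [pvGetD_set, if_neg (by omega)]
          exact (hzero j (by omega)).2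
        · rw [pvGetD_set, if_pos ⟨rfl, by omega⟩]; omega
        · exact (hzero (m + 1) (by omega)).1
        · simp only [Nat.add_sub_cancel]
          rw [if_pos (by omega : (3:Int) ≤ c + 1)]
          omega
      · -- fresh run after a falling step
        rw [if_neg (by omega : ¬(1 ≤ m ∧ 0 < L.getD m 0)), if_neg (by omega : ¬(p = 1))]
        unfold pvInv
        dsimp only
        refine ⟨by omega, hLlen, by simpa using hSlen, ?_,
          Or.inr (Or.inr ⟨rfl, by omega, by omega, ?_, ?_, ?_⟩)⟩
        · intro j hj
          refine ⟨(hzero j (by omega)).1, ?_⟩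
          rw [pvGetD_set, if_neg (by omega)]
          exact (hzero j (by omega)).2
        · rw [pvGetD_set, if_pos ⟨rfl, by omega⟩]; norm_num
        · exact (hzero (m + 1) (by omega)).1
        · simp only [Nat.add_sub_cancel]
          rw [if_neg (by norm_num)]
          exact hLm

theorem pvSmallA (x : Int) : countSawSubarrays [x] = 0 := by
  unfold countSawSubarrays
  rw [if_pos (Or.inr (by simp [PySem.List.len_eq]))]

theorem pvSmallB (x : Int) : countSawSubarrays_alt [x] = 0 := by
  unfold countSawSubarrays_alt
  rw [PySem.List.slice_from_one]
  rfl

-- ===== VERDICT (by name: the statement is the Claim_ definition above) =====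
theorem countSawSubarrays_spec : Claim_equal_countSawSubarrays := by
  intro array _
  unfold Spec_countSawSubarrays
  by_cases hlen : array.length < 2
  · rcases array with _ | ⟨x, _ | ⟨y, t⟩⟩
    · rfl
    · rw [pvSmallA, pvSmallB]
    · simp at hlen
  · obtain ⟨hres, -, -, -, -⟩ := pvMain array (array.length - 1) (by omega)
    have hb : ((array.length - 1 : Nat) : Int) + 1 = PySem.List.len array := by
      simp [PySem.List.len_eq]; omega
    have hAe : countSawSubarrays array = (pvA array (array.length - 1)).2.2 := by
      unfold countSawSubarrays pvA
      rw [if_neg (by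
        push Not
        refine ⟨List.ne_nil_of_length_pos (by omega), ?_⟩
        simp [PySem.List.len_eq]; omega), hb]
    have hBe : countSawSubarrays_alt array = (pvB array (array.length - 1)).1 := by
      unfold countSawSubarrays_alt pvB
      rw [PySem.List.slice_from_one,
        List.take_of_length_le (by simp [List.length_zip, List.length_tail])]
    rw [hAe, hBe, hres]
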